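-- pv_equiv track=rewrite | github.com/kimbap1001/CodingTest-Java | 백준/Gold/6198. 옥상 정원 꾸미기/옥상 정원 꾸미기.py | solve
-- ===== SOURCE A (Python) =====
-- def solve(towers:list)->int:
--     towers.reverse() #구현 편의를 위해 역순처리
--     stack=[(1000000001,0)]
--     result=0
--     for tower in towers:
--         while tower[0]>stack[-1][0]:
--             stack.pop()
--         result += tower[1] - stack[-1][1] - 1 #스택 탑과 현재 빌딩의 위치 사이의 빌딩 개수를 추가
--         stack.append(tower)
--     return result
-- ===== SOURCE B (Python) =====
-- def solve(towers: list) -> int: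
--     towers.reverse()  # same in-place reversal as the original
--     result = 0
--     seen = []  # all already-processed towers, most recent first (nothing is ever removed)
--     for h, p in towers:
--         q = 0  # sentinel position: no earlier tower is at least as tall
--         for e in seen:
--             if e[0] >= h:
--                 q = e[1]
--                 break
--         result += p - q - 1
--         seen.insert(0, (h, p))
--     return result
-- ===== Notes on version B (the rewrite author's own statement) =====
-- stated objective: alternative
-- what changed: Drops the monotonic stack entirely: B keeps every processed tower in a prefix list and, per tower, linearly scans that full prefix (most recent first) for the first tower of height >= the current one, defaulting to position 0; A's destructive pop loop and its sentinel pair disappear.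
import Mathlib
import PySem

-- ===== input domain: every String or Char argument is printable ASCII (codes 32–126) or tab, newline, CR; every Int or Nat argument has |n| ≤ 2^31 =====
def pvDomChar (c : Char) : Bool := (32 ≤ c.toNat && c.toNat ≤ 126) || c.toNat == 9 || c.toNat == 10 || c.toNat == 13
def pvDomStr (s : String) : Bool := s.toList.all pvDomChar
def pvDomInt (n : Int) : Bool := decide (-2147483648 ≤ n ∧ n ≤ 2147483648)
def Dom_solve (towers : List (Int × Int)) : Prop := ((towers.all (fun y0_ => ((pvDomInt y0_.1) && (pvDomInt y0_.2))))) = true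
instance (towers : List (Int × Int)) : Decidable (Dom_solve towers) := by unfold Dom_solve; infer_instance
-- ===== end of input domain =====

-- B drops A's monotonic stack: it keeps every processed tower and linearly scans that
-- prefix for the first one at least as tall (objective: alternative).  Both Pythons
-- reverse `towers` in place; the equivalence proved is about the return value
-- (B performs the same mutation).

-- ===== PORT A =====
-- The stack is kept most-recent-first (Python's stack[-1] = head here).
-- Python's `while tower[0] > stack[-1][0]: stack.pop()`; the [] case is Python's
-- IndexError (stack[-1] on empty), unreachable under Pre_solve.
def popLoop (h : Int) (stack : List (Int × Int)) : List (Int × Int) :=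
  match stack with
  | [] => []
  | top :: rest => if h > top.1 then popLoop h rest else top :: rest

def solve (towers : List (Int × Int)) : Int :=
  let towers := towers.reverse
  (towers.foldl
    (fun (st : List (Int × Int) × Int) tower =>
      let stack := popLoop tower.1 st.1
      (tower :: stack, st.2 + tower.2 - (stack.headD (0, 0)).2 - 1))
    ([(1000000001, 0)], 0)).2

-- ===== PORT B =====
-- Source B's inner `for e in seen: if e[0] >= h: q = e[1]; break` with default q = 0
def firstGe (h : Int) (seen : List (Int × Int)) : Int :=
  match seen with
  | [] => 0
  | e :: rest => if e.1 ≥ h then e.2 else firstGe h rest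

-- Source B's outer loop: `seen` is built most-recent-first (seen.insert(0, t) = cons)
def solveAltGo : List (Int × Int) → List (Int × Int) → Int → Int
  | [], _, result => result
  | t :: ts, seen, result => solveAltGo ts (t :: seen) (result + t.2 - firstGe t.1 seen - 1)

def solve_alt (towers : List (Int × Int)) : Int :=
  solveAltGo towers.reverse [] 0

-- ===== PRECONDITION & SPEC =====
-- Pre_ excludes exactly the inputs where Python A raises IndexError: a tower taller
-- than the sentinel 1000000001 pops the sentinel and stack[-1] is taken on an empty list.
def Pre_solve (towers : List (Int × Int)) : Prop :=
  ∀ t ∈ towers, t.1 ≤ 1000000001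

instance (towers : List (Int × Int)) : Decidable (Pre_solve towers) := by
  unfold Pre_solve; infer_instance

def pvWitness_solve : (List (Int × Int)) := [(10, 1), (3, 2), (7, 3), (4, 4), (12, 5), (2, 6)]

def Spec_solve (towers : List (Int × Int)) (out : Int) : Prop := out = solve_alt towers
instance (towers : List (Int × Int)) (out : Int) : Decidable (Spec_solve towers out) := by unfold Spec_solve; infer_instance

-- ===== CLAIM (what is proved, stated in full; the proofs are below) =====
def Claim_equal_solve : Prop := ∀ (towers : List (Int × Int)), Dom_solve towers → Pre_solve towers → Spec_solve towers (solve towers)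

-- ===== LEMMAS AND PROOFS =====

-- popping the entries of height < h does not change a pop for a threshold g > h
lemma popLoop_popLoop (g h : Int) (s : List (Int × Int)) (hg : h < g) :
    popLoop g (popLoop h s) = popLoop g s := by
  induction s with
  | nil => rfl
  | cons top rest ih =>
    by_cases hc : h > top.1
    · have hg2 : g > top.1 := by omega
      simp only [popLoop, if_pos hc, if_pos hg2, ih]
    · simp only [popLoop, if_neg hc]

-- loop invariant: for every bounded threshold, the head of A's popped stack carries the
-- same position as B's linear scan of the full processed prefix.
lemma fold_eq (l : List (Int × Int)) (hb : ∀ t ∈ l, t.1 ≤ 1000000001)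
    (stack seen : List (Int × Int)) (r : Int)
    (hinv : ∀ g, g ≤ 1000000001 → ((popLoop g stack).headD (0, 0)).2 = firstGe g seen) :
    (l.foldl
      (fun (st : List (Int × Int) × Int) tower =>
        let stack := popLoop tower.1 st.1
        (tower :: stack, st.2 + tower.2 - (stack.headD (0, 0)).2 - 1))
      (stack, r)).2
    = solveAltGo l seen r := by
  induction l generalizing stack seen r with
  | nil => rfl
  | cons t ts ih =>
    have hbt : t.1 ≤ 1000000001 := hb t (by simp)
    simp only [List.foldl_cons, solveAltGo]
    rw [hinv t.1 hbt]
    apply ih (fun x hx => hb x (by simp [hx]))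
    intro g hg
    simp only [firstGe]
    by_cases hc : t.1 ≥ g
    · rw [if_pos hc]
      simp only [popLoop, if_neg (show ¬ g > t.1 by omega)]
      rfl
    · rw [if_neg hc]
      simp only [popLoop, if_pos (show g > t.1 by omega)]
      rw [popLoop_popLoop g t.1 _ (by omega), hinv g hg]

-- ===== VERDICT (by name: the statement is the Claim_ definition above) =====
theorem solve_spec : Claim_equal_solve := by
  intro towers _ hpre
  unfold Spec_solve solve solve_alt
  apply fold_eq
  · intro t ht
    exact hpre t (List.mem_reverse.mp ht)
  · intro g hg
    simp only [popLoop, if_neg (by omega : ¬ g > (1000000001 : Int))]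
    rfl
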